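-- pv_equiv track=rewrite | github.com/TommyUnreal/adventofcode2022 | 17/puzzle_1.py | move_stone
-- ===== SOURCE A (Python) =====
-- from math import copysign
--
-- def move_toward_zero(n:int) -> int:
--     """Move n one closer to zero by 1."""
--     return n - copysign(1, n) if abs(n) > 1 else 0
--
-- def move_stone(rock:list, move:int)->list:
--     """Move rock by move to left or right. Negative move is to the left.
--
--     Args:
--         rock (list[list(int)]): Rock to be moved.
--         move (int): How many indexes shall be moved (negative to left)
--
--     Returns:
--         list: moved rock
--     """
--     num_rows = len(rock)
--     num_cols = len(rock[0])
--     move     = int(move)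
--     # If the move is negative, remove "move" columns from the left and add "move" columns to the right
--     if move < 0:
--         new_rock = [row[-move:] + [0] * -move for row in rock]
--     # If the move is positive, remove "move" columns from the right and add "move" columns to the left
--     elif move > 0:
--         new_rock = [[0] * move + row[:num_cols-move] for row in rock]
--     else:
--         new_rock = rock
--
--     # If the number of columns in the new list is different from the original, return the original list
--     if sum(map(sum,new_rock)) != sum(map(sum,rock)):
--         new_rock = move_stone(rock, move_toward_zero(move))
--
--     return new_rock
-- ===== SOURCE B (Python) =====
-- def move_stone(rock, move):
--     """Move rock by move to left or right. Negative move is to the left.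
--
--     Instead of re-shifting the whole rock once per retry, precompute per-row
--     prefix sums once, find the largest feasible shift magnitude k (the one A's
--     unary recursion toward zero ends at) with O(rows) checks, and apply the
--     shift a single time.
--     """
--     num_cols = len(rock[0])
--     move = int(move)
--
--     # prefs[r][t] = sum of the first t cells of row r
--     prefs = []
--     for row in rock:
--         p = [0]
--         s = 0
--         for v in row:
--             s += v
--             p.append(s)
--         prefs.append(p)
--
--     def lost(k):
--         # total cell value falling off the grid when shifting by k (sign of move)
--         if move < 0:
--             return sum(p[min(k, len(p) - 1)] for p in prefs)
--         b = num_cols - k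
--         out = 0
--         for p in prefs:
--             n = len(p) - 1
--             t = min(b, n) if b >= 0 else max(0, n + b)
--             out += p[n] - p[t]
--         return out
--
--     k = abs(move)
--     while k > 0 and lost(k) != 0:
--         k -= 1
--
--     if k == 0:
--         return rock
--     if move < 0:
--         return [row[k:] + [0] * k for row in rock]
--     return [[0] * k + row[:num_cols - k] for row in rock]
-- ===== Notes on version B (the rewrite author's own statement) =====
-- stated objective: faster
-- what changed: A recursively retries: it re-slices the whole rock and re-sums it once per unit of |move| until the row sums are preserved; B builds per-row prefix sums once, finds the final shift magnitude with an O(rows) feasibility check per candidate, and applies the shift a single time.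
-- outside the precondition, e.g. on move_stone([[1]], 960): A returns [[1]], B returns [[1]]
import Mathlib
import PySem

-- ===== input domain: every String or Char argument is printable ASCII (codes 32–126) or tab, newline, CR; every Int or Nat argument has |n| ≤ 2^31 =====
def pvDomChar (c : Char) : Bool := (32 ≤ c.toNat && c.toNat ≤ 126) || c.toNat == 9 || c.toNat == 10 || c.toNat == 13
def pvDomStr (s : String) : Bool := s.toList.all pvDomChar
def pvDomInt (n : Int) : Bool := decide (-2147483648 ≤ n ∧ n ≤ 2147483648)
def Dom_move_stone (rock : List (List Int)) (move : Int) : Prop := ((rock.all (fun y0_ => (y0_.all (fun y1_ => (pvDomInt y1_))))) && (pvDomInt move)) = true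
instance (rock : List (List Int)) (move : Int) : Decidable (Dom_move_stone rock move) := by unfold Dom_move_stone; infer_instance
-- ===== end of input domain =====

-- B replaces A's per-unit-of-|move| recursive retry (each retry re-slices the whole rock and
-- re-sums it) by one pass of per-row prefix sums, an O(rows) feasibility check per candidate
-- shift magnitude, and a single application of the shift; objective: faster.

-- ===== PORT A =====
-- sum(map(sum, xs))
def pySum2 (xs : List (List Int)) : Int := (xs.map List.sum).sum

-- return n - copysign(1, n) if abs(n) > 1 else 0
def move_toward_zero (n : Int) : Int :=
  if 1 < |n| then n - (if n < 0 then -1 else 1) else 0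

def move_stone (rock : List (List Int)) (move : Int) : List (List Int) :=
  -- rock[0] raises IndexError on rock = []; Pre_move_stone excludes that input
  let num_cols : Int := ((rock.headD []).length : Int)
  let new_rock : List (List Int) :=
    if move < 0 then
      rock.map (fun row => PySem.List.slice row (some (-move)) none ++ List.replicate (-move).toNat 0)
    else if move > 0 then
      rock.map (fun row => List.replicate move.toNat 0 ++ PySem.List.slice row none (some (num_cols - move)))
    else rock
  if _h : pySum2 new_rock ≠ pySum2 rock then
    move_stone rock (move_toward_zero move)
  else new_rock
termination_by move.natAbs
decreasing_by
  have hm : move ≠ 0 := by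
    rintro rfl
    simp only [new_rock] at _h
    simp at _h
  simp only [move_toward_zero, abs]
  split_ifs <;> omega

-- ===== PORT B =====
-- p = [0]; s = 0; for v in row: s += v; p.append(s)
def prefixList (row : List Int) : List Int :=
  (row.foldl (fun (ps : List Int × Int) v => (ps.1 ++ [ps.2 + v], ps.2 + v)) ([0], 0)).1

-- def lost(k) of Source B (closes over move and num_cols)
def lostB (move num_cols : Int) (prefs : List (List Int)) (k : Int) : Int :=
  if move < 0 then
    (prefs.map (fun p => p.getD (min k ((p.length : Int) - 1)).toNat 0)).sum
  else
    let b := num_cols - k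
    prefs.foldl (fun out p =>
      let n : Int := (p.length : Int) - 1
      let t : Int := if 0 ≤ b then min b n else max 0 (n + b)
      out + (p.getD n.toNat 0 - p.getD t.toNat 0)) 0

-- k = abs(move); while k > 0 and lost(k) != 0: k -= 1
def findK (move num_cols : Int) (prefs : List (List Int)) : Nat → Nat
  | 0 => 0
  | (k+1) => if lostB move num_cols prefs ((k : Int) + 1) ≠ 0 then findK move num_cols prefs k else k + 1

def move_stone_alt (rock : List (List Int)) (move : Int) : List (List Int) :=
  let num_cols : Int := ((rock.headD []).length : Int)   -- rock[0]: Pre_ excludes rock = []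
  let prefs := rock.map prefixList
  let k := findK move num_cols prefs move.natAbs
  if k = 0 then rock
  else if move < 0 then
    rock.map (fun row => PySem.List.slice row (some (k : Int)) none ++ List.replicate k 0)
  else
    rock.map (fun row => List.replicate k 0 ++ PySem.List.slice row none (some (num_cols - (k : Int))))

-- ===== PRECONDITION & SPEC =====
-- total the rock keeps when shifted by magnitude k in move's direction, compared with its total
def shiftKeeps (rock : List (List Int)) (move : Int) (k : Nat) : Bool :=
  let nc : Int := ((rock.headD []).length : Int)
  let kept : List Int :=
    if move < 0 then rock.map (fun row => (row.drop k).sum)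
    else rock.map (fun row => (PySem.List.slice row none (some (nc - (k : Int)))).sum)
  kept.sum == (rock.map List.sum).sum

-- Pre_ excludes rock = [] (rock[0] raises IndexError) and inputs whose recursion is deeper than
-- 950 frames: A recurses once per unit from |move| down to the first shift magnitude that
-- preserves the rock's total, so if no magnitude within 950 of |move| preserves it, CPython can
-- raise RecursionError; the exact limit depends on the interpreter's stack state, so the 950
-- bound is conservative and a narrow band of deep-but-returning inputs is also excluded.
def Pre_move_stone (rock : List (List Int)) (move : Int) : Prop :=
  rock ≠ [] ∧ (move.natAbs ≤ 950 ∨ ∃ j ∈ List.range 951, shiftKeeps rock move (move.natAbs - j) = true)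
instance (rock : List (List Int)) (move : Int) : Decidable (Pre_move_stone rock move) := by
  unfold Pre_move_stone; infer_instance

def pvWitness_move_stone : List (List Int) × Int := ([[1, 2], [0, 3]], -1)

def Spec_move_stone (rock : List (List Int)) (move : Int) (out : List (List Int)) : Prop := out = move_stone_alt rock move
instance (rock : List (List Int)) (move : Int) (out : List (List Int)) : Decidable (Spec_move_stone rock move out) := by unfold Spec_move_stone; infer_instance

-- ===== CLAIM (what is proved, stated in full; the proofs are below) =====
def Claim_equal_move_stone : Prop := ∀ (rock : List (List Int)) (move : Int), Dom_move_stone rock move → Pre_move_stone rock move → Spec_move_stone rock move (move_stone rock move)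

-- ===== LEMMAS AND PROOFS =====

-- running prefix sums starting at s
def cums (s : Int) : List Int → List Int
  | [] => [s]
  | v :: vs => s :: cums (s + v) vs

lemma foldl_prefix (row : List Int) : ∀ (acc : List Int) (s : Int),
    row.foldl (fun (ps : List Int × Int) v => (ps.1 ++ [ps.2 + v], ps.2 + v)) (acc ++ [s], s)
      = (acc ++ cums s row, s + row.sum) := by
  induction row with
  | nil => intro acc s; simp [cums]
  | cons v vs ih =>
      intro acc s
      simp only [List.foldl_cons]
      have := ih (acc ++ [s]) (s + v)
      simp only [List.append_assoc, List.singleton_append] at this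
      simp [cums, this]
      ring

lemma prefixList_eq (row : List Int) : prefixList row = cums 0 row := by
  have := foldl_prefix row [] 0
  simp only [List.nil_append] at this
  simp [prefixList, this]

lemma cums_length (row : List Int) : ∀ s : Int, (cums s row).length = row.length + 1 := by
  induction row with
  | nil => intro s; simp [cums]
  | cons v vs ih => intro s; simp [cums, ih]

lemma cums_getD (row : List Int) : ∀ (s : Int) (t : Nat), t ≤ row.length →
    (cums s row).getD t 0 = s + (row.take t).sum := by
  induction row with
  | nil =>
      intro s t ht
      simp only [List.length_nil, Nat.le_zero] at ht
      have : t = 0 := ht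
      subst this
      simp [cums]
  | cons v vs ih =>
      intro s t ht
      cases t with
      | zero => simp [cums]
      | succ t' =>
          simp only [cums, List.getD_cons_succ, List.take_succ_cons, List.sum_cons]
          rw [ih (s + v) t' (by simpa using ht)]
          ring

-- the Python slice row[:b] for an arbitrary int bound b
lemma slice_stop (row : List Int) (b : Int) :
    PySem.List.slice row none (some b) = row.take (if 0 ≤ b then b.toNat else row.length - (-b).toNat) := by
  by_cases hb : 0 ≤ b
  · simp [hb, PySem.List.slice_to row hb]
  · have hk : 0 < (-b).toNat := by omega
    have hb2 : (some b : Option Int) = some (-(((-b).toNat : Nat) : Int)) := by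
      congr 1; omega
    rw [if_neg hb, hb2, PySem.List.slice_to_neg_natCast row ((-b).toNat) hk]

lemma sum_map_sub (l : List (List Int)) (f g : List Int → Int) :
    (l.map (fun r => f r - g r)).sum = (l.map f).sum - (l.map g).sum := by
  induction l with
  | nil => simp
  | cons a t ih => simp [ih]; ring

-- lostB when moving left: total of the first k cells of every row
lemma lost_left (rock : List (List Int)) (move nc k : Int) (hm : move < 0) (hk : 1 ≤ k) :
    lostB move nc (rock.map prefixList) k
      = (rock.map (fun row => (row.take k.toNat).sum)).sum := by
  unfold lostB
  rw [if_pos hm, List.map_map]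
  congr 1
  apply List.map_congr_left
  intro row _
  simp only [Function.comp_apply, prefixList_eq, cums_length]
  have h1 : ((row.length + 1 : Nat) : Int) - 1 = (row.length : Int) := by push_cast; ring
  rw [h1]
  have h2 : (min k ((row.length : Nat) : Int)).toNat = min k.toNat row.length := by omega
  rw [h2, cums_getD row 0 _ (by omega)]
  rw [← List.take_eq_take_min]
  simp

-- lostB when moving right (move ≥ 0 branch): total of the cells slid off each row
lemma lost_right (rock : List (List Int)) (move nc k : Int) (hm : ¬ move < 0) :
    lostB move nc (rock.map prefixList) k
      = (rock.map (fun row => row.sum - (PySem.List.slice row none (some (nc - k))).sum)).sum := by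
  unfold lostB
  rw [if_neg hm]
  simp only []
  rw [PySem.List.foldl_add, List.map_map]
  simp only [zero_add]
  congr 1
  apply List.map_congr_left
  intro row _
  simp only [Function.comp_apply, prefixList_eq, cums_length]
  have h1 : ((row.length + 1 : Nat) : Int) - 1 = (row.length : Int) := by push_cast; ring
  rw [h1]
  have hn : ((row.length : Int)).toNat = row.length := by omega
  rw [hn, cums_getD row 0 _ (le_refl _), List.take_length, zero_add]
  congr 1
  -- kept part: p[t] = sum(row[:b])
  set b := nc - k with hbdef
  rw [slice_stop]
  by_cases hb : 0 ≤ b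
  · rw [if_pos hb, if_pos hb]
    have h2 : (min b ((row.length : Nat) : Int)).toNat = min b.toNat row.length := by omega
    rw [h2, cums_getD row 0 _ (by omega), ← List.take_eq_take_min]
    simp
  · rw [if_neg hb, if_neg hb]
    have h2 : (max 0 ((row.length : Int) + b)).toNat = row.length - (-b).toNat := by omega
    rw [h2, cums_getD row 0 _ (by omega)]
    simp

-- sum of A's shifted rock = sum of rock - lostB |move|
lemma sum_shift_left (rock : List (List Int)) (move nc : Int) (hm : move < 0) :
    pySum2 (rock.map fun row => PySem.List.slice row (some (-move)) none ++ List.replicate (-move).toNat 0)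
      = pySum2 rock - lostB move nc (rock.map prefixList) (-move) := by
  rw [lost_left rock move nc (-move) hm (by omega)]
  unfold pySum2
  rw [List.map_map, ← sum_map_sub]
  congr 1
  apply List.map_congr_left
  intro row _
  simp only [Function.comp_apply, List.sum_append, List.sum_replicate, smul_zero, add_zero]
  rw [PySem.List.slice_from row (by omega : (0:Int) ≤ -move)]
  have := List.sum_take_add_sum_drop row (-move).toNat
  omega

lemma sum_shift_right (rock : List (List Int)) (move nc : Int) (hm : ¬ move < 0) :
    pySum2 (rock.map fun row => List.replicate move.toNat 0 ++ PySem.List.slice row none (some (nc - move)))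
      = pySum2 rock - lostB move nc (rock.map prefixList) move := by
  rw [lost_right rock move nc move hm]
  unfold pySum2
  rw [List.map_map, ← sum_map_sub]
  congr 1
  apply List.map_congr_left
  intro row _
  simp only [Function.comp_apply, List.sum_append, List.sum_replicate, smul_zero, zero_add]
  ring

-- lostB and findK only read the sign of their move argument
lemma lostB_congr (move move' nc : Int) (prefs : List (List Int)) (k : Int)
    (h : move < 0 ↔ move' < 0) : lostB move nc prefs k = lostB move' nc prefs k := by
  unfold lostB
  by_cases hm : move < 0
  · rw [if_pos hm, if_pos (h.mp hm)]
  · rw [if_neg hm, if_neg (fun hh => hm (h.mpr hh))]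

lemma findK_congr (move move' nc : Int) (prefs : List (List Int)) (K : Nat)
    (h : move < 0 ↔ move' < 0) : findK move nc prefs K = findK move' nc prefs K := by
  induction K with
  | zero => rfl
  | succ k ih =>
      simp only [findK, lostB_congr move move' nc prefs _ h, ih]

-- shape of the final shift B performs (proof-side restatement of move_stone_alt's tail)
def applyShift (rock : List (List Int)) (move nc : Int) (k : Nat) : List (List Int) :=
  if k = 0 then rock
  else if move < 0 then
    rock.map (fun row => PySem.List.slice row (some (k : Int)) none ++ List.replicate k 0)
  else
    rock.map (fun row => List.replicate k 0 ++ PySem.List.slice row none (some (nc - (k : Int))))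

lemma alt_eq (rock : List (List Int)) (move : Int) :
    move_stone_alt rock move
      = applyShift rock move ((rock.headD []).length : Int)
          (findK move ((rock.headD []).length : Int) (rock.map prefixList) move.natAbs) := by
  rfl

lemma applyShift_congr (rock : List (List Int)) (move move' nc : Int) (k : Nat)
    (h : move < 0 ↔ move' < 0) : applyShift rock move nc k = applyShift rock move' nc k := by
  unfold applyShift
  by_cases hk : k = 0
  · simp [hk]
  · rw [if_neg hk, if_neg hk]
    by_cases hm : move < 0
    · rw [if_pos hm, if_pos (h.mp hm)]
    · rw [if_neg hm, if_neg (fun hh => hm (h.mpr hh))]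

-- facts about move_toward_zero
lemma mtz_natAbs (move : Int) (K : Nat) (h : move.natAbs = K + 1) :
    (move_toward_zero move).natAbs = K := by
  unfold move_toward_zero
  simp only [abs]
  split_ifs <;> omega

lemma mtz_sign (move : Int) (h : 2 ≤ move.natAbs) :
    (move_toward_zero move < 0 ↔ move < 0) := by
  unfold move_toward_zero
  simp only [abs]
  split_ifs <;> omega

-- the main induction: A's recursion lands exactly on B's findK result
lemma main_lemma (rock : List (List Int)) : ∀ (K : Nat) (move : Int), move.natAbs = K →
    move_stone rock move
      = applyShift rock move ((rock.headD []).length : Int)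
          (findK move ((rock.headD []).length : Int) (rock.map prefixList) K) := by
  intro K
  induction K with
  | zero =>
      intro move hK
      have : move = 0 := by omega
      subst this
      rw [move_stone]
      simp [applyShift, findK, pySum2]
  | succ k ih =>
      intro move hK
      rw [move_stone]
      by_cases hm : move < 0
      · rw [if_pos hm]
        have hcast : -move = (k : Int) + 1 := by omega
        have hsum := sum_shift_left rock move ((rock.headD []).length : Int) hm
        by_cases hlost : lostB move ((rock.headD []).length : Int) (rock.map prefixList) (-move) = 0
        · -- sums equal: A returns the shifted rock; findK keeps k+1
          rw [dif_neg (by rw [hsum]; omega)]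
          rw [hcast] at hlost
          have hfind : findK move ((rock.headD []).length : Int) (rock.map prefixList) (k + 1) = k + 1 := by
            simp only [findK]
            rw [if_neg (by simpa using hlost)]
          rw [hfind]
          unfold applyShift
          rw [if_neg (Nat.succ_ne_zero k), if_pos hm]
          apply List.map_congr_left
          intro row _
          have h1 : (-move).toNat = k + 1 := by omega
          have h2 : -move = (((k + 1 : Nat)) : Int) := by omega
          rw [h1, h2]
        · -- sums differ: A recurses; findK steps down
          rw [dif_pos (by rw [hsum]; omega)]
          rw [hcast] at hlost
          rw [ih (move_toward_zero move) (mtz_natAbs move k hK)]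
          have hfind : findK move ((rock.headD []).length : Int) (rock.map prefixList) (k + 1)
              = findK move ((rock.headD []).length : Int) (rock.map prefixList) k := by
            simp only [findK]
            rw [if_pos (by simpa using hlost)]
          rw [hfind]
          by_cases hk1 : k = 0
          · subst hk1
            simp [applyShift, findK]
          · have hsg := mtz_sign move (by omega)
            rw [applyShift_congr rock _ move _ _ hsg,
                findK_congr _ move ((rock.headD []).length : Int) (rock.map prefixList) k hsg]
      · have hpos : 0 < move := by omega
        rw [if_neg hm, if_pos hpos]
        have hcast : move = (k : Int) + 1 := by omega
        have hsum := sum_shift_right rock move ((rock.headD []).length : Int) hm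
        by_cases hlost : lostB move ((rock.headD []).length : Int) (rock.map prefixList) move = 0
        · rw [dif_neg (by rw [hsum]; omega)]
          have hfind : findK move ((rock.headD []).length : Int) (rock.map prefixList) (k + 1) = k + 1 := by
            simp only [findK]
            rw [if_neg (by rw [show ((k : Int) + 1) = move from hcast.symm]; simpa using hlost)]
          rw [hfind]
          unfold applyShift
          rw [if_neg (Nat.succ_ne_zero k), if_neg hm]
          apply List.map_congr_left
          intro row _
          have h1 : move.toNat = k + 1 := by omega
          have h2 : move = (((k + 1 : Nat)) : Int) := by omega
          rw [h1, h2]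
        · rw [dif_pos (by rw [hsum]; omega)]
          rw [ih (move_toward_zero move) (mtz_natAbs move k hK)]
          have hfind : findK move ((rock.headD []).length : Int) (rock.map prefixList) (k + 1)
              = findK move ((rock.headD []).length : Int) (rock.map prefixList) k := by
            simp only [findK]
            rw [if_pos (by rw [show ((k : Int) + 1) = move from hcast.symm]; simpa using hlost)]
          rw [hfind]
          by_cases hk1 : k = 0
          · subst hk1
            simp [applyShift, findK]
          · have hsg := mtz_sign move (by omega)
            rw [applyShift_congr rock _ move _ _ hsg,
                findK_congr _ move ((rock.headD []).length : Int) (rock.map prefixList) k hsg]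

-- ===== VERDICT (by name: the statement is the Claim_ definition above) =====
theorem move_stone_spec : Claim_equal_move_stone := by
  intro rock move _ _
  unfold Spec_move_stone
  rw [alt_eq, main_lemma rock move.natAbs move rfl]
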